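-- pv_equiv track=rewrite | github.com/agheieff/Agent | Core/agent.py | is_exit_command
-- ===== SOURCE A (Python) =====
-- def is_exit_command(command_type: str, command: str) -> bool:
--     lower_cmd = command.strip().lower()
--     exit_cmds = {"exit", "quit", "bye", "done"}
--     if lower_cmd in exit_cmds:
--         return True
--     for exit_cmd in exit_cmds:
--         if lower_cmd.startswith(f"{exit_cmd} "):
--             return True
--     return False
-- ===== SOURCE B (Python) =====
-- def is_exit_command(command_type: str, command: str) -> bool:
--     first = command.strip().lower().split(" ")[0]
--     return first in {"exit", "quit", "bye", "done"}
-- ===== Notes on version B (the rewrite author's own statement) =====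
-- stated objective: simpler
-- what changed: A tests exact equality against the four exit words and then loops over them testing 'word '-prefixes; B computes the first space-delimited token once and does a single membership test, removing the prefix loop.
import Mathlib
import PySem

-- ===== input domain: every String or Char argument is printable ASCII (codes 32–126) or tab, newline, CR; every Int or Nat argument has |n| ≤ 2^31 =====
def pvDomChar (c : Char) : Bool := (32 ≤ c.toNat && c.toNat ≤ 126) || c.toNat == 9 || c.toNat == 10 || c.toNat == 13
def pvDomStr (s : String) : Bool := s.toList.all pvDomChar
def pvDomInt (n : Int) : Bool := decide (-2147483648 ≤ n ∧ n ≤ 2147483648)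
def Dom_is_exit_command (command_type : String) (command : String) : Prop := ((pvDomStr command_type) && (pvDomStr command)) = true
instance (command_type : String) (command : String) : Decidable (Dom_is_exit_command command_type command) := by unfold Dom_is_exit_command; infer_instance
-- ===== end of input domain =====

-- B replaces A's exact-match test plus per-word prefix loop by a single first-token membership test (objective: simpler).


-- ===== PORT A =====
def is_exit_command (_command_type : String) (command : String) : Bool :=
  let lower_cmd := PySem.Str.lower (PySem.Str.strip command)
  let exit_cmds := ["exit", "quit", "bye", "done"]
  if exit_cmds.contains lower_cmd then true
  else exit_cmds.any (fun exit_cmd => PySem.Str.startswith lower_cmd (exit_cmd ++ " "))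

-- ===== PORT B =====
def is_exit_command_alt (_command_type : String) (command : String) : Bool :=
  let first := (((PySem.Str.split? (PySem.Str.lower (PySem.Str.strip command)) " ").getD []).headD "")
  ["exit", "quit", "bye", "done"].contains first

-- ===== PRECONDITION & SPEC =====
def Spec_is_exit_command (command_type : String) (command : String) (out : Bool) : Prop := out = is_exit_command_alt command_type command
instance (command_type : String) (command : String) (out : Bool) : Decidable (Spec_is_exit_command command_type command out) := by unfold Spec_is_exit_command; infer_instance

-- ===== CLAIM (what is proved, stated in full; the proofs are below) =====
def Claim_equal_is_exit_command : Prop := ∀ (command_type : String) (command : String), Dom_is_exit_command command_type command → Spec_is_exit_command command_type command (is_exit_command command_type command)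

-- ===== LEMMAS AND PROOFS =====

-- one unfolding step of splitOn.go (definitional)
theorem pv_go_cons (fuel : Nat) (c : Char) (rest cur : List Char) (acc : List (List Char)) :
    PySem.Chars.splitOn.go [' '] (fuel+1) (c :: rest) cur acc =
      if [' '].isPrefixOf (c :: rest) = true then
        PySem.Chars.splitOn.go [' '] fuel (List.drop 1 (c :: rest)) [] (cur.reverse :: acc)
      else PySem.Chars.splitOn.go [' '] fuel rest (c :: cur) acc := rfl

theorem pv_go_nil (fuel : Nat) (cur : List Char) (acc : List (List Char)) :
    PySem.Chars.splitOn.go [' '] (fuel+1) [] cur acc = (cur.reverse :: acc).reverse := rfl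

-- once the accumulator is nonempty, the head of splitOn.go's result is the accumulator's last element
theorem pv_go_head_acc (fuel : Nat) (l cur : List Char) (acc : List (List Char)) (p : List Char) :
    ((PySem.Chars.splitOn.go [' '] fuel l cur (acc ++ [p])).headD []) = p := by
  induction fuel generalizing l cur acc with
  | zero => simp [PySem.Chars.splitOn.go.eq_def]
  | succ fuel ih =>
    cases l with
    | nil => simp [pv_go_nil]
    | cons c rest =>
      rw [pv_go_cons]
      by_cases hc : c = ' '
      · rw [if_pos (by simp [List.isPrefixOf, hc])]
        have := ih (List.drop 1 (c :: rest)) [] (cur.reverse :: acc)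
        simpa using this
      · rw [if_neg (by simp [List.isPrefixOf]; exact fun h => hc h.symm)]
        exact ih rest (c :: cur) acc

-- head of splitOn.go with an empty accumulator = cur.reverse ++ the leading space-free segment
theorem pv_go_head (fuel : Nat) (l cur : List Char) (hl : l.length ≤ fuel) :
    ((PySem.Chars.splitOn.go [' '] fuel l cur []).headD []) = cur.reverse ++ l.takeWhile (fun c => c != ' ') := by
  induction fuel generalizing l cur with
  | zero =>
    have : l = [] := List.eq_nil_of_length_eq_zero (Nat.le_zero.mp hl)
    subst this; simp [PySem.Chars.splitOn.go.eq_def]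
  | succ fuel ih =>
    cases l with
    | nil => simp [pv_go_nil]
    | cons c rest =>
      rw [pv_go_cons]
      by_cases hc : c = ' '
      · rw [if_pos (by simp [List.isPrefixOf, hc])]
        subst hc
        simpa [List.takeWhile] using pv_go_head_acc fuel rest [] [] cur.reverse
      · rw [if_neg (by simp [List.isPrefixOf]; exact fun h => hc h.symm)]
        rw [ih rest (c :: cur) (by simpa using Nat.le_of_succ_le_succ hl)]
        have hb : (c != ' ') = true := by simp [hc]
        simp [List.takeWhile, hb]

theorem pv_head_splitOn (t : List Char) :
    ((PySem.Chars.splitOn t [' ']).headD []) = t.takeWhile (fun c => c != ' ') := by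
  unfold PySem.Chars.splitOn
  exact pv_go_head (t.length + 1) t [] (by omega)

theorem pv_takeWhile_all (p : Char → Bool) (w r : List Char) (h : ∀ c ∈ w, p c = true) :
    (w ++ r).takeWhile p = w ++ r.takeWhile p := by
  induction w with
  | nil => simp
  | cons a as ih => simp_all

-- for a space-free word w: t = w or t starts with "w " iff the first space-delimited token of t is w
theorem pv_tok_iff (t w : List Char) (hw : ' ' ∉ w) :
    (t = w ∨ (w ++ [' ']) <+: t) ↔ t.takeWhile (fun c => c != ' ') = w := by
  constructor
  · rintro (rfl | ⟨r, hr⟩)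
    · exact List.takeWhile_eq_self_iff.mpr (fun c hc => by simp; rintro rfl; exact hw hc)
    · rw [← hr, List.append_assoc, pv_takeWhile_all _ _ _ (fun c hc => by simp; rintro rfl; exact hw hc)]
      simp
  · intro h
    have hsplit : t = w ++ t.dropWhile (fun c => c != ' ') := by
      conv_lhs => rw [← List.takeWhile_append_dropWhile (p := fun c => c != ' ') (l := t)]
      rw [h]
    cases hd : t.dropWhile (fun c => c != ' ') with
    | nil => left; rw [hsplit, hd]; simp
    | cons d ds =>
      have hdf : (fun c => c != ' ') d = false := by
        have := List.head_dropWhile_not (p := fun c => c != ' ') (l := t) (by simp [hd])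
        simpa [hd] using this
      have hd' : d = ' ' := by simpa using hdf
      right
      exact ⟨ds, by rw [hsplit, hd, hd']; simp⟩

-- propositional shuffle used by pv_words
theorem pv_shuffle (A1 A2 A3 A4 B1 B2 B3 B4 C1 C2 C3 C4 : Prop)
    (h1 : A1 ∨ B1 ↔ C1) (h2 : A2 ∨ B2 ↔ C2) (h3 : A3 ∨ B3 ↔ C3) (h4 : A4 ∨ B4 ↔ C4) :
    ((A1 ∨ A2 ∨ A3 ∨ A4) ∨ (B1 ∨ B2 ∨ B3 ∨ B4)) ↔ (C1 ∨ C2 ∨ C3 ∨ C4) := by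
  constructor
  · rintro ((a | a | a | a) | (b | b | b | b))
    · exact Or.inl (h1.mp (Or.inl a))
    · exact Or.inr (Or.inl (h2.mp (Or.inl a)))
    · exact Or.inr (Or.inr (Or.inl (h3.mp (Or.inl a))))
    · exact Or.inr (Or.inr (Or.inr (h4.mp (Or.inl a))))
    · exact Or.inl (h1.mp (Or.inr b))
    · exact Or.inr (Or.inl (h2.mp (Or.inr b)))
    · exact Or.inr (Or.inr (Or.inl (h3.mp (Or.inr b))))
    · exact Or.inr (Or.inr (Or.inr (h4.mp (Or.inr b))))
  · rintro (c | c | c | c)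
    · rcases h1.mpr c with a | b
      · exact Or.inl (Or.inl a)
      · exact Or.inr (Or.inl b)
    · rcases h2.mpr c with a | b
      · exact Or.inl (Or.inr (Or.inl a))
      · exact Or.inr (Or.inr (Or.inl b))
    · rcases h3.mpr c with a | b
      · exact Or.inl (Or.inr (Or.inr (Or.inl a)))
      · exact Or.inr (Or.inr (Or.inr (Or.inl b)))
    · rcases h4.mpr c with a | b
      · exact Or.inl (Or.inr (Or.inr (Or.inr a)))
      · exact Or.inr (Or.inr (Or.inr (Or.inr b)))

-- the Chars-level equality of the two decision procedures, one word at a time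
theorem pv_words (t : List Char) :
    ((t = "exit".toList ∨ t = "quit".toList ∨ t = "bye".toList ∨ t = "done".toList) ∨
     ((" exit ".toList.drop 1) <+: t ∨ (" quit ".toList.drop 1) <+: t ∨ (" bye ".toList.drop 1) <+: t ∨ (" done ".toList.drop 1) <+: t)) ↔
    (t.takeWhile (fun c => c != ' ') = "exit".toList ∨ t.takeWhile (fun c => c != ' ') = "quit".toList ∨
     t.takeWhile (fun c => c != ' ') = "bye".toList ∨ t.takeWhile (fun c => c != ' ') = "done".toList) := by
  have h1 := pv_tok_iff t "exit".toList (by simp)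
  have h2 := pv_tok_iff t "quit".toList (by simp)
  have h3 := pv_tok_iff t "bye".toList (by simp)
  have h4 := pv_tok_iff t "done".toList (by simp)
  have e1 : (" exit ".toList.drop 1) = "exit".toList ++ [' '] := by simp
  have e2 : (" quit ".toList.drop 1) = "quit".toList ++ [' '] := by simp
  have e3 : (" bye ".toList.drop 1) = "bye".toList ++ [' '] := by simp
  have e4 : (" done ".toList.drop 1) = "done".toList ++ [' '] := by simp
  rw [e1, e2, e3, e4]
  exact pv_shuffle _ _ _ _ _ _ _ _ _ _ _ _ h1 h2 h3 h4

-- ===== VERDICT (by name: the statement is the Claim_ definition above) =====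
theorem is_exit_command_spec : Claim_equal_is_exit_command := by
  intro command_type command _
  unfold Spec_is_exit_command is_exit_command is_exit_command_alt
  rw [Bool.eq_iff_iff]
  obtain ⟨ps, hps⟩ : ∃ ps, PySem.Str.split? (PySem.Str.lower (PySem.Str.strip command)) " " = some ps := by
    apply Option.ne_none_iff_exists'.mp
    intro h
    have := PySem.Str.split?_map (PySem.Str.lower (PySem.Str.strip command)) " "
    rw [h] at this
    simp [PySem.Chars.split?] at this
  have hmap : ps.map String.toList = PySem.Chars.splitOn (PySem.Str.lower (PySem.Str.strip command)).toList [' '] := by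
    have := PySem.Str.split?_map (PySem.Str.lower (PySem.Str.strip command)) " "
    rw [hps] at this
    simpa [PySem.Chars.split?] using this
  have hhead : (ps.headD "").toList = (PySem.Str.lower (PySem.Str.strip command)).toList.takeWhile (fun c => c != ' ') := by
    rw [← pv_head_splitOn, ← hmap]
    cases ps <;> simp
  simp only [hps, Option.getD_some]
  simp only [List.contains_eq_mem, List.any_eq_true, List.mem_cons, List.not_mem_nil, or_false,
    decide_eq_true_eq, Bool.if_true_left, Bool.or_eq_true, PySem.Str.startswith_eq,
    PySem.Chars.startswith_iff, exists_eq_or_imp, exists_eq_left]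
  simp only [← String.toList_inj, hhead]
  have happ : ∀ w : String, (w ++ " ").toList = w.toList ++ [' '] := by
    intro w; simp
  rw [happ, happ, happ, happ]
  have e1 : ("exit".toList ++ [' ']) = (" exit ".toList.drop 1) := by simp
  have e2 : ("quit".toList ++ [' ']) = (" quit ".toList.drop 1) := by simp
  have e3 : ("bye".toList ++ [' ']) = (" bye ".toList.drop 1) := by simp
  have e4 : ("done".toList ++ [' ']) = (" done ".toList.drop 1) := by simp
  rw [e1, e2, e3, e4]
  exact pv_words (PySem.Str.lower (PySem.Str.strip command)).toList
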